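-- pv_equiv track=rewrite | github.com/HeoTaksung/Document-to-Sequence-BERT-using-Sequence-Attention | utils.py | data_preprocessing
-- ===== SOURCE A (Python) =====
-- def data_preprocessing(rdr, code):
--     texts = []
--
--     labels = []
--
--     for idx, line in enumerate(rdr):
--         if idx == 0:
--             continue
--         text = ""
--         label = [0 for _ in range(len(code))]
--         for i in line[2].split('\n'):
--             text += i + ' '
--         for i in line[-1].split(';'):
--             if i in code:
--                 label[code.index(i)] = 1
--         text = text.split()
--
--         if len(text) > 2500:
--             text = text[:2500]
--
--         etc = []
--         etc2 = []
--
--         for i in range(len(text)):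
--             etc.append(text[i])
--             if len(etc) % 100 == 0:
--                 etc2.append(' '.join(etc))
--                 etc = []
--         if len(etc) % 100 != 0:
--             etc2.append(' '.join(etc))
--         if len(etc2) != 25:
--             for i in range(25 - len(etc2)):
--                 etc2.append(' ')
--
--         texts.append(etc2)
--         labels.append(label)
--
--     return texts, labels
-- ===== SOURCE B (Python) =====
-- def data_preprocessing(rdr, code):
--     # first-occurrence index of each label value (replaces the repeated `in`/`.index` scans)
--     first = {}
--     for j, c in enumerate(code):
--         first.setdefault(c, j)
--
--     rows = rdr[1:]
--
--     def row_text(line):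
--         text = ""
--         for i in line[2].split('\n'):
--             text += i + ' '
--         words = text.split()[:2500]
--         # fixed-window slicing instead of a per-word accumulator with a %100 flush
--         chunks = []
--         rest = words
--         while rest:
--             chunks.append(' '.join(rest[:100]))
--             rest = rest[100:]
--         return chunks + [' '] * (25 - len(chunks))
--
--     def row_label(line):
--         label = [0] * len(code)
--         for p in line[-1].split(';'):
--             j = first.get(p)
--             if j is not None:
--                 label[j] = 1
--         return label
--
--     return [row_text(line) for line in rows], [row_label(line) for line in rows]
-- ===== Notes on version B (the rewrite author's own statement) =====
-- stated objective: simpler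
-- what changed: B maps two row functions over rdr[1:] instead of A's enumerate-and-skip accumulator loop, builds the 100-word chunks by fixed-window slicing of the word list instead of A's per-word accumulator with a len(etc)%100 flush and conditional tail/pad steps, and marks labels through a first-occurrence value-to-index dict built once instead of A's per-part `in`/`.index` scans of code.
import Mathlib
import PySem

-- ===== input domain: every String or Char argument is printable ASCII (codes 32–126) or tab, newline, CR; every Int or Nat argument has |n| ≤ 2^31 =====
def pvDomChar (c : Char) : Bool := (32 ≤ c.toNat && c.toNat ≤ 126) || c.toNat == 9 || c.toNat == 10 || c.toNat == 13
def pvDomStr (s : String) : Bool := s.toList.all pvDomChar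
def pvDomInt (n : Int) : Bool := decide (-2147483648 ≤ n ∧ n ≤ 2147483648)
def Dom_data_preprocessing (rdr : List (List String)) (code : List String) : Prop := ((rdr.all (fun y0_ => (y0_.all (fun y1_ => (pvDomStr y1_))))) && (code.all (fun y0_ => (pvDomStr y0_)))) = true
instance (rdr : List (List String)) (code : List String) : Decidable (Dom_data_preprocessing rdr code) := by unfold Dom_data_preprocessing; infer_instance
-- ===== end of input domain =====

-- B replaces A's per-word accumulator with %100 flushes by fixed-window slicing, A's repeated
-- `in`/`.index` label scans by a first-occurrence index dict built once, and A's enumerate-and-skip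
-- accumulator loop by mapping two row functions over rdr[1:] (objective: a simpler decomposition).

-- ===== PORT A =====
-- `etc.append(text[i]); if len(etc) % 100 == 0: etc2.append(' '.join(etc)); etc = []`
def pvA_chunkStep (st : List String × List String) (w : String) : List String × List String :=
  let etc := st.1 ++ [w]
  if etc.length % 100 == 0 then ([], st.2 ++ [PySem.Str.join " " etc]) else (etc, st.2)

-- `if len(etc) % 100 != 0: etc2.append(' '.join(etc))`
def pvA_finish (st : List String × List String) : List String :=
  if st.1.length % 100 ≠ 0 then st.2 ++ [PySem.Str.join " " st.1] else st.2

-- the body of A's `for idx, line` loop for one data row (idx ≥ 1): returns (etc2, label)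
def pvA_row (code : List String) (line : List String) : List String × List Int :=
  let text := ((PySem.Str.split? (PySem.List.pyGetD line 2 "") "\n").getD []).foldl (fun t i => t ++ i ++ " ") ""
  let label0 := (PySem.List.pyRange 0 (code.length : Int) 1).map (fun _ => (0 : Int))
  let label := ((PySem.Str.split? (PySem.List.pyGetD line (-1) "") ";").getD []).foldl
      (fun lab i => if code.contains i then
          PySem.List.pySetD lab (((PySem.List.index? code i).getD 0 : Nat) : Int) 1
        else lab) label0
  let tw0 := PySem.Str.split₀ text
  let tw := if tw0.length > 2500 then PySem.List.slice tw0 none (some 2500) else tw0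
  let fin := (PySem.List.pyRange 0 (tw.length : Int) 1).foldl
      (fun st i => pvA_chunkStep st (PySem.List.pyGetD tw i "")) ([], [])
  let etc2 := pvA_finish fin
  let etc2 := if etc2.length ≠ 25 then
      (PySem.List.pyRange 0 (25 - (etc2.length : Int)) 1).foldl (fun l _ => l ++ [" "]) etc2
    else etc2
  (etc2, label)

def data_preprocessing (rdr : List (List String)) (code : List String) :
    List (List String) × List (List Int) :=
  (PySem.List.enumerate rdr 0).foldl
    (fun st p =>
      if p.1 == 0 then st
      else
        let r := pvA_row code p.2
        (st.1 ++ [r.1], st.2 ++ [r.2]))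
    ([], [])

-- ===== PORT B =====
-- `while rest: chunks.append(' '.join(rest[:100])); rest = rest[100:]`
def pvB_chunks (rest : List String) : List String :=
  if h : rest = [] then []
  else
    PySem.Str.join " " (PySem.List.slice rest none (some 100)) ::
      pvB_chunks (PySem.List.slice rest (some 100) none)
termination_by rest.length
decreasing_by
  rw [PySem.List.slice_from rest (by norm_num)]
  have : rest.length ≠ 0 := fun h0 => h (List.eq_nil_of_length_eq_zero h0)
  simp only [List.length_drop]
  omega

def pvB_rowText (line : List String) : List String :=
  let text := ((PySem.Str.split? (PySem.List.pyGetD line 2 "") "\n").getD []).foldl (fun t i => t ++ i ++ " ") ""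
  let words := PySem.List.slice (PySem.Str.split₀ text) none (some 2500)
  let chunks := pvB_chunks words
  chunks ++ List.replicate (25 - chunks.length) " "

def pvB_rowLabel (first : PySem.Dict String Int) (code : List String) (line : List String) : List Int :=
  let label := List.replicate code.length (0 : Int)
  ((PySem.Str.split? (PySem.List.pyGetD line (-1) "") ";").getD []).foldl
    (fun lab p => match first.get? p with
      | some j => PySem.List.pySetD lab j 1
      | none => lab)
    label

def data_preprocessing_alt (rdr : List (List String)) (code : List String) :
    List (List String) × List (List Int) :=
  let first := (PySem.List.enumerate code 0).foldl (fun d q => d.setdefault q.2 q.1) PySem.Dict.empty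
  let rows := PySem.List.slice rdr (some 1) none
  (rows.map pvB_rowText, rows.map (pvB_rowLabel first code))

-- ===== PRECONDITION & SPEC =====
-- Pre_ excludes exactly the inputs where the Python A raises IndexError: some data row
-- (a row after the header row, which A skips) has fewer than 3 fields, so `line[2]` or
-- `line[-1]` fails.
def Pre_data_preprocessing (rdr : List (List String)) (code : List String) : Prop :=
  ∀ line ∈ rdr.drop 1, 3 ≤ line.length
instance (rdr : List (List String)) (code : List String) : Decidable (Pre_data_preprocessing rdr code) := by unfold Pre_data_preprocessing; infer_instance

def pvWitness_data_preprocessing : List (List String) × List String :=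
  ([["h"], ["id", "t", "a b c\nd", "x;y"]], ["x", "z"])

def Spec_data_preprocessing (rdr : List (List String)) (code : List String) (out : List (List String) × List (List Int)) : Prop := out = data_preprocessing_alt rdr code
instance (rdr : List (List String)) (code : List String) (out : List (List String) × List (List Int)) : Decidable (Spec_data_preprocessing rdr code out) := by unfold Spec_data_preprocessing; infer_instance

-- ===== CLAIM (what is proved, stated in full; the proofs are below) =====
def Claim_equal_data_preprocessing : Prop := ∀ (rdr : List (List String)) (code : List String), Dom_data_preprocessing rdr code → Pre_data_preprocessing rdr code → Spec_data_preprocessing rdr code (data_preprocessing rdr code)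

-- ===== LEMMAS AND PROOFS =====

lemma pv_pyRange_nonpos {m : Int} (h : m ≤ 0) : PySem.List.pyRange 0 m 1 = [] := by
  simp [PySem.List.pyRange]; omega

lemma pv_fold_pad {α : Type} (xs : List α) (acc : List String) :
    xs.foldl (fun acc _ => acc ++ [" "]) acc = acc ++ List.replicate xs.length " " := by
  induction xs generalizing acc with
  | nil => simp
  | cons x xs ih => rw [List.foldl_cons, ih, List.length_cons, List.replicate_succ]; simp

-- A's conditional pad loop equals B's unconditional replicate pad.
lemma pv_pad_eq (l : List String) :
    (if l.length ≠ 25 then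
        (PySem.List.pyRange 0 (25 - (l.length : Int)) 1).foldl (fun acc _ => acc ++ [" "]) l
      else l)
      = l ++ List.replicate (25 - l.length) " " := by
  rcases eq_or_ne l.length 25 with h | h
  · simp [h]
  · rw [if_pos h]
    by_cases hl : l.length ≤ 25
    · have h1 : (25 - (l.length : Int)) = ((25 - l.length : Nat) : Int) := by omega
      rw [h1, PySem.List.pyRange_zero_natCast, pv_fold_pad]
      simp
    · rw [pv_pyRange_nonpos (by omega)]
      have : 25 - l.length = 0 := by omega
      simp [this]

lemma pvB_chunks_nil : pvB_chunks [] = [] := by rw [pvB_chunks]; simp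

lemma pvB_chunks_cons (rest : List String) (h : rest ≠ []) :
    pvB_chunks rest = PySem.Str.join " " (rest.take 100) :: pvB_chunks (rest.drop 100) := by
  rw [pvB_chunks, dif_neg h, PySem.List.slice_to rest (by norm_num), PySem.List.slice_from rest (by norm_num)]
  rfl

-- A's %100 accumulator loop, finished, produces exactly B's fixed-window chunks.
lemma pv_chunks_inv (ws etc etc2 : List String) (h : etc.length < 100) :
    pvA_finish (ws.foldl pvA_chunkStep (etc, etc2)) = etc2 ++ pvB_chunks (etc ++ ws) := by
  induction ws generalizing etc etc2 with
  | nil =>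
    rcases eq_or_ne etc [] with he | he
    · subst he
      simp [pvA_finish, pvB_chunks_nil]
    · have hlen : etc.length ≠ 0 := fun h0 => he (List.eq_nil_of_length_eq_zero h0)
      rw [List.foldl_nil, List.append_nil, pvB_chunks_cons etc he]
      rw [List.take_of_length_le (by omega), List.drop_eq_nil_of_le (by omega), pvB_chunks_nil]
      simp [pvA_finish, Nat.mod_eq_of_lt h, hlen]
  | cons w ws ih =>
    rw [List.foldl_cons]
    rcases eq_or_ne etc.length 99 with h99 | h99
    · have hstep : pvA_chunkStep (etc, etc2) w = ([], etc2 ++ [PySem.Str.join " " (etc ++ [w])]) := by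
        simp [pvA_chunkStep, h99]
      rw [hstep, ih _ _ (by simp), List.nil_append]
      have hlen : (etc ++ [w]).length = 100 := by simp [h99]
      have hr : etc ++ w :: ws = (etc ++ [w]) ++ ws := by simp
      rw [hr, pvB_chunks_cons ((etc ++ [w]) ++ ws) (by simp),
          List.take_left' hlen, List.drop_left' hlen]
      simp
    · have hstep : pvA_chunkStep (etc, etc2) w = (etc ++ [w], etc2) := by
        simp only [pvA_chunkStep, List.length_append, List.length_cons, List.length_nil]
        rw [if_neg (by simp; omega)]
      rw [hstep, ih _ _ (by simp; omega)]
      simp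

-- B's setdefault dict holds the first-occurrence index of each key.
lemma pv_first_get (cs : List String) (s : Int) (d : PySem.Dict String Int) (p : String) :
    (((PySem.List.enumerate cs s).foldl (fun d q => d.setdefault q.2 q.1) d).get? p)
      = (d.get? p).or ((PySem.List.index? cs p).map (fun k => s + (k : Int))) := by
  induction cs generalizing s d with
  | nil =>
    simp [PySem.List.enumerate_nil, PySem.List.index?]
  | cons c cs ih =>
    rw [PySem.List.enumerate_cons, List.foldl_cons, ih]
    rcases eq_or_ne p c with hpc | hpc
    · subst hpc
      rw [PySem.Dict.get?_setdefault_self, PySem.List.index?_cons_self]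
      cases hd : d.get? p <;> simp [hd]
    · rw [PySem.Dict.get?_setdefault_of_ne _ _ hpc, PySem.List.index?_cons_of_ne _ (Ne.symm hpc)]
      cases hi : PySem.List.index? cs p <;> cases hd : d.get? p <;>
        simp [hi, hd] <;> push_cast <;> ring

lemma pv_label0_eq (n : Nat) :
    (PySem.List.pyRange 0 (n : Int) 1).map (fun _ => (0 : Int)) = List.replicate n (0 : Int) := by
  rw [PySem.List.pyRange_zero_natCast, List.map_map]
  simp [List.eq_replicate_iff]

lemma pv_trunc_eq (t : List String) :
    (if t.length > 2500 then PySem.List.slice t none (some 2500) else t)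
      = PySem.List.slice t none (some 2500) := by
  rw [PySem.List.slice_to t (by norm_num)]
  split_ifs with h
  · rfl
  · exact (List.take_of_length_le (by simpa using by omega)).symm

-- one row of A equals B's two row functions (with B's first-occurrence dict).
set_option maxHeartbeats 1000000 in
lemma pv_row_eq (code line : List String) :
    pvA_row code line
      = (pvB_rowText line,
         pvB_rowLabel ((PySem.List.enumerate code 0).foldl (fun d q => d.setdefault q.2 q.1) PySem.Dict.empty) code line) := by
  have hfirst : ∀ q, (((PySem.List.enumerate code 0).foldl (fun d q => d.setdefault q.2 q.1) PySem.Dict.empty).get? q)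
      = (PySem.List.index? code q).map (fun k => (k : Int)) := by
    intro q
    rw [pv_first_get]
    simp
  simp only [pvA_row, pvB_rowText, pvB_rowLabel]
  rw [Prod.mk.injEq]
  refine ⟨?_, ?_⟩
  · -- texts component
    rw [pv_trunc_eq]
    rw [PySem.List.foldl_pyRange_pyGetD' _ "" pvA_chunkStep ([], []) le_rfl]
    rw [Int.toNat_zero, List.drop_zero]
    rw [pv_chunks_inv _ [] [] (by simp), List.nil_append, List.nil_append]
    exact pv_pad_eq _
  · -- labels component
    rw [pv_label0_eq]
    congr 1
    funext lab i
    rw [hfirst i]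
    cases hi : PySem.List.index? code i with
    | none =>
      have hn : i ∉ code := (PySem.List.index?_eq_none_iff code i).mp hi
      simp [hn]
    | some k =>
      have hmem : i ∈ code := by
        rw [← PySem.List.index?_isSome_iff code i, hi]; rfl
      simp [hmem]

-- from index 1 on, A's enumerate loop never skips and appends one row pair per line.
lemma pv_outer (code : List String) (xs : List (List String)) :
    ∀ (s : Int) (ts : List (List String)) (ls : List (List Int)), 1 ≤ s →
    (PySem.List.enumerate xs s).foldl
        (fun st p =>
          if p.1 == 0 then st
          else
            let r := pvA_row code p.2
            (st.1 ++ [r.1], st.2 ++ [r.2]))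
        (ts, ls)
      = (ts ++ xs.map (fun l => (pvA_row code l).1), ls ++ xs.map (fun l => (pvA_row code l).2)) := by
  induction xs with
  | nil => intro s ts ls _; simp [PySem.List.enumerate_nil]
  | cons x xs ih =>
    intro s ts ls hs
    rw [PySem.List.enumerate_cons, List.foldl_cons]
    rw [if_neg (by simp; omega)]
    rw [ih (s + 1) _ _ (by omega)]
    simp

lemma pv_main (rdr : List (List String)) (code : List String) :
    data_preprocessing rdr code = data_preprocessing_alt rdr code := by
  unfold data_preprocessing data_preprocessing_alt
  cases rdr with
  | nil => simp [PySem.List.enumerate_nil, PySem.List.slice_from_one]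
  | cons x xs =>
    rw [PySem.List.enumerate_cons, List.foldl_cons, if_pos (by simp)]
    rw [show (0:Int)+1 = 1 from by norm_num]
    rw [pv_outer code xs 1 [] [] le_rfl]
    rw [PySem.List.slice_from_one]
    simp only [List.tail_cons, List.nil_append]
    rw [Prod.mk.injEq]
    constructor <;>
      { apply List.map_congr_left; intro l _; rw [pv_row_eq code l] }

-- ===== VERDICT (by name: the statement is the Claim_ definition above) =====
theorem data_preprocessing_spec : Claim_equal_data_preprocessing := by
  intro rdr code _ _
  unfold Spec_data_preprocessing
  exact pv_main rdr code
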